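-- pv_equiv track=rewrite | github.com/Ace1928/eidosian_forge | archive_forge/src/archive_forge/2maH.py | generate_color_spectrum
-- ===== SOURCE A (Python) =====
-- from typing import List, Tuple, Generator
-- from typing import List, Generator
--
-- def generate_color_spectrum(steps: int = 256) -> List[str]:
--     """
--     Generates a color spectrum.
--
--     Args:
--         steps (int): The number of colors to generate.
--
--     Returns:
--         List[str]: A list of hexadecimal color codes.
--     """
--     spectrum = []
--     # Define key colors in the spectrum
--     colors = [
--         "#000000",
--         "#808080",  # Black to gray
--         "#FFFFFF",  # White
--         "#FF0000",
--         "#FFA500",  # Red to orange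
--         "#FFFF00",  # Yellow
--         "#008000",
--         "#0000FF",  # Green to blue
--         "#4B0082",
--         "#EE82EE",  # Indigo to violet
--         "#FF00FF",  # Fuchsia
--     ]
--     color_transition_steps = steps // (len(colors) - 1)
--
--     for i in range(len(colors) - 1):
--         start_color = colors[i]
--         end_color = colors[i + 1]
--         for step in range(color_transition_steps):
--             # Calculate the intermediate color
--             start_rgb = tuple(int(start_color[j : j + 2], 16) for j in (1, 3, 5))
--             end_rgb = tuple(int(end_color[j : j + 2], 16) for j in (1, 3, 5))
--             interp_rgb = tuple(
--                 start + (end - start) * step // (color_transition_steps - 1)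
--                 for start, end in zip(start_rgb, end_rgb)
--             )
--             spectrum.append("#" + "".join(f"{value:02x}" for value in interp_rgb))
--
--     return spectrum
-- ===== SOURCE B (Python) =====
-- def generate_color_spectrum(steps: int = 256):
--     """Channel-wise staged construction: build the full red, green and blue
--     sequences separately, then zip and format them in a final pass."""
--     anchors = [
--         (0, 0, 0), (128, 128, 128), (255, 255, 255),
--         (255, 0, 0), (255, 165, 0), (255, 255, 0),
--         (0, 128, 0), (0, 0, 255), (75, 0, 130),
--         (238, 130, 238), (255, 0, 255),
--     ]
--     cts = steps // (len(anchors) - 1)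
--
--     def channel(ch):
--         return [a[ch] + (b[ch] - a[ch]) * s // (cts - 1)
--                 for a, b in zip(anchors, anchors[1:])
--                 for s in range(cts)]
--
--     return ["#%02x%02x%02x" % t
--             for t in zip(channel(0), channel(1), channel(2))]
-- ===== Notes on version B (the rewrite author's own statement) =====
-- stated objective: alternative
-- what changed: B is a staged, channel-wise construction: it precomputes the anchors as RGB tuples and builds the complete red, green and blue sequences as three separate comprehension passes over zip(anchors, anchors[1:]), then zips the three channel lists and formats each triple in a final pass, instead of A's single nested loop that re-parses both hex strings on every inner iteration and appends one finished string at a time.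
import Mathlib
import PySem

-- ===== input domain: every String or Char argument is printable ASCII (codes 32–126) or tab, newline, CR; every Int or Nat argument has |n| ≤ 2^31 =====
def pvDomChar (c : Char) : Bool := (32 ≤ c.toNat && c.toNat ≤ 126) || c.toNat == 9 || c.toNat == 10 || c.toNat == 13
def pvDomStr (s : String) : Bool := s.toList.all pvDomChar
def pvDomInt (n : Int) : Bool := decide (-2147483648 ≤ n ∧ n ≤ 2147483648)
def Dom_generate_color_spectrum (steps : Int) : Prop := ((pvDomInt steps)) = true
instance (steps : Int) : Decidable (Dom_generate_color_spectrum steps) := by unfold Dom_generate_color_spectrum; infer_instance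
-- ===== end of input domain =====

-- B builds the full red, green and blue channel sequences as three separate staged passes over
-- zip(anchors, anchors[1:]) and then zips/formats them in a final pass, instead of A's single
-- nested loop that re-parses both hex strings and emits one string per inner iteration
-- (objective: alternative decomposition; same cost).

-- ===== PORT A =====
-- int(c, 16) for one hex digit; exact on the hex digits A's slices produce
def pvHexDigit (c : Char) : Int :=
  if '0' ≤ c ∧ c ≤ '9' then (c.toNat : Int) - 48
  else if 'a' ≤ c ∧ c ≤ 'f' then (c.toNat : Int) - 87
  else (c.toNat : Int) - 55

-- int(s, 16); exact on the hex-digit strings A's slices produce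
def pvHex2Val (s : String) : Int :=
  s.toList.foldl (fun acc c => 16 * acc + pvHexDigit c) 0

-- tuple(int(color[j:j+2], 16) for j in (1, 3, 5))
def pvParseRGB (c : String) : Int × Int × Int :=
  (pvHex2Val (PySem.Str.slice c (some 1) (some 3)),
   pvHex2Val (PySem.Str.slice c (some 3) (some 5)),
   pvHex2Val (PySem.Str.slice c (some 5) (some 7)))

-- f"{v:02x}" / "%02x" % v; exact for 0 ≤ v < 256 (all interpolated components lie there)
def pvHexChar (d : Int) : Char :=
  if d < 10 then Char.ofNat (48 + d.toNat) else Char.ofNat (87 + d.toNat)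
def pvFmt02x (v : Int) : String :=
  String.ofList [pvHexChar (PySem.Int.floordiv v 16), pvHexChar (PySem.Int.mod v 16)]

def pvColors : List String :=
  ["#000000", "#808080", "#FFFFFF", "#FF0000", "#FFA500", "#FFFF00",
   "#008000", "#0000FF", "#4B0082", "#EE82EE", "#FF00FF"]

def generate_color_spectrum (steps : Int) : List String :=
  let colors := pvColors
  let cts := PySem.Int.floordiv steps ((colors.length : Int) - 1)
  (PySem.List.pyRange 0 ((colors.length : Int) - 1)).foldl
    (fun spectrum i =>
      -- colors[i] / colors[i+1]: i ∈ range(len(colors)-1) so the index is always in range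
      let start_color := PySem.List.pyGetD colors i ""
      let end_color := PySem.List.pyGetD colors (i + 1) ""
      (PySem.List.pyRange 0 cts).foldl
        (fun spectrum step =>
          let s := pvParseRGB start_color
          let e := pvParseRGB end_color
          let r := s.1 + PySem.Int.floordiv ((e.1 - s.1) * step) (cts - 1)
          let g := s.2.1 + PySem.Int.floordiv ((e.2.1 - s.2.1) * step) (cts - 1)
          let b := s.2.2 + PySem.Int.floordiv ((e.2.2 - s.2.2) * step) (cts - 1)
          spectrum ++ ["#" ++ PySem.Str.join "" [pvFmt02x r, pvFmt02x g, pvFmt02x b]])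
        spectrum)
    []

-- ===== PORT B =====
def pvAnchors : List (Int × Int × Int) :=
  [(0, 0, 0), (128, 128, 128), (255, 255, 255),
   (255, 0, 0), (255, 165, 0), (255, 255, 0),
   (0, 128, 0), (0, 0, 255), (75, 0, 130),
   (238, 130, 238), (255, 0, 255)]

-- channel(ch): one full per-channel sequence as a nested comprehension over zip(anchors, anchors[1:])
def pvChannel (cts : Int) (pick : Int × Int × Int → Int) : List Int :=
  (pvAnchors.zip pvAnchors.tail).flatMap (fun ab =>
    (PySem.List.pyRange 0 cts).map (fun s =>
      pick ab.1 + PySem.Int.floordiv ((pick ab.2 - pick ab.1) * s) (cts - 1)))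

def generate_color_spectrum_alt (steps : Int) : List String :=
  let cts := PySem.Int.floordiv steps ((pvAnchors.length : Int) - 1)
  (((pvChannel cts (·.1)).zip (pvChannel cts (·.2.1))).zip (pvChannel cts (·.2.2))).map
    (fun t => "#" ++ pvFmt02x t.1.1 ++ pvFmt02x t.1.2 ++ pvFmt02x t.2)

-- ===== PRECONDITION & SPEC =====
-- Pre_ excludes exactly 10 ≤ steps ≤ 19: there steps // 10 == 1 and A raises ZeroDivisionError
-- (division by color_transition_steps - 1 == 0); B raises there too.
def Pre_generate_color_spectrum (steps : Int) : Prop := steps < 10 ∨ 20 ≤ steps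
instance (steps : Int) : Decidable (Pre_generate_color_spectrum steps) := by
  unfold Pre_generate_color_spectrum; infer_instance

def pvWitness_generate_color_spectrum : Int := 30

def Spec_generate_color_spectrum (steps : Int) (out : List String) : Prop := out = generate_color_spectrum_alt steps
instance (steps : Int) (out : List String) : Decidable (Spec_generate_color_spectrum steps out) := by unfold Spec_generate_color_spectrum; infer_instance

-- ===== CLAIM (what is proved, stated in full; the proofs are below) =====
def Claim_equal_generate_color_spectrum : Prop := ∀ (steps : Int), Dom_generate_color_spectrum steps → Pre_generate_color_spectrum steps → Spec_generate_color_spectrum steps (generate_color_spectrum steps)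

-- ===== LEMMAS AND PROOFS =====

-- the common per-cell string (i-th segment, s-th step, with n = cts)
def pvElem (n : Int) (i s : Nat) : String :=
  let a := pvAnchors.getD i (0, 0, 0)
  let b := pvAnchors.getD (i + 1) (0, 0, 0)
  "#" ++ pvFmt02x (a.1 + PySem.Int.floordiv ((b.1 - a.1) * (s : Int)) (n - 1))
      ++ pvFmt02x (a.2.1 + PySem.Int.floordiv ((b.2.1 - a.2.1) * (s : Int)) (n - 1))
      ++ pvFmt02x (a.2.2 + PySem.Int.floordiv ((b.2.2 - a.2.2) * (s : Int)) (n - 1))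

theorem pv_join3 (x y z : String) : PySem.Str.join "" [x, y, z] = x ++ y ++ z := by
  simp [PySem.Str.join, PySem.Chars.join, List.intercalate]
  ext
  simp

theorem pv_parse_eq (i : Nat) (h : i < 11) :
    pvParseRGB (PySem.List.pyGetD pvColors (i : Int) "") = pvAnchors.getD i (0, 0, 0) := by
  interval_cases i <;> decide

-- zip of two maps over the same list is one map of the pair
theorem pv_zip_map_same {α β γ : Type} (f : α → β) (g : α → γ) (l : List α) :
    (l.map f).zip (l.map g) = l.map (fun x => (f x, g x)) := by
  induction l with
  | nil => rfl
  | cons a l ih => simp [ih]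

-- the three staged channel passes, zipped and formatted, collapse to one nested flatMap/map
theorem pv_staged {α : Type} (L : List α) (R : List Int) (f g h : α → Int → Int) :
    ((((L.flatMap fun a => R.map (f a)).zip (L.flatMap fun a => R.map (g a))).zip
        (L.flatMap fun a => R.map (h a))).map
      (fun t => "#" ++ pvFmt02x t.1.1 ++ pvFmt02x t.1.2 ++ pvFmt02x t.2)) =
    L.flatMap (fun a => R.map (fun s =>
      "#" ++ pvFmt02x (f a s) ++ pvFmt02x (g a s) ++ pvFmt02x (h a s))) := by
  induction L with
  | nil => rfl
  | cons a L ih =>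
    simp only [List.flatMap_cons]
    rw [List.zip_append (by simp), List.zip_append (by simp), List.map_append, ih]
    congr 1
    rw [pv_zip_map_same, pv_zip_map_same, List.map_map]
    rfl

-- zip(anchors, anchors[1:]) as indexed access over range 10
theorem pv_pairs_eq :
    pvAnchors.zip pvAnchors.tail =
      (List.range 10).map (fun i => (pvAnchors.getD i (0, 0, 0), pvAnchors.getD (i + 1) (0, 0, 0))) := by
  decide

-- B as a flatMap over segments of maps over steps (range m = cts)
theorem pv_B_eq_flat (steps : Int) (m : Nat)
    (hn : PySem.Int.floordiv steps 10 = (m : Int)) :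
    generate_color_spectrum_alt steps =
      (List.range 10).flatMap (fun i => (List.range m).map (pvElem (m : Int) i)) := by
  have h10 : ((pvAnchors.length : Int) - 1) = 10 := by norm_num [pvAnchors]
  simp only [generate_color_spectrum_alt, h10, hn, pvChannel]
  rw [pv_staged]
  rw [pv_pairs_eq, List.flatMap_map]
  simp only [PySem.List.pyRange_zero_natCast, List.map_map]
  refine List.flatMap_congr (fun i _ => List.map_congr_left (fun s _ => ?_))
  rfl

-- A as the flattened nested loops
theorem pv_A_eq_flat (steps : Int) (m : Nat)
    (hn : PySem.Int.floordiv steps 10 = (m : Int)) :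
    generate_color_spectrum steps =
      (List.range 10).flatMap (fun i => (List.range m).map (pvElem (m : Int) i)) := by
  have h10c : ((pvColors.length : Int) - 1) = 10 := by norm_num [pvColors]
  simp only [generate_color_spectrum, h10c, hn]
  simp only [PySem.List.foldl_append_singleton_eq_map]
  rw [PySem.List.foldl_append_eq_flatMap, List.nil_append]
  rw [show (10 : Int) = ((10 : Nat) : Int) from rfl]
  rw [PySem.List.pyRange_zero_natCast]
  rw [PySem.List.pyRange_zero_natCast, List.flatMap_map]
  refine List.flatMap_congr (fun i hi => ?_)
  have hi' : i < 10 := List.mem_range.mp hi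
  rw [List.map_map]
  refine List.map_congr_left (fun t ht => ?_)
  simp only [Function.comp, pvElem]
  rw [pv_join3, pv_parse_eq i (by omega)]
  rw [show ((i : Nat) : Int) + 1 = (((i + 1) : Nat) : Int) by push_cast; ring,
    pv_parse_eq (i + 1) (by omega)]
  simp [String.append_assoc]

theorem pv_foldl_id {α β : Type} (l : List α) (init : List β) :
    l.foldl (fun acc _ => acc) init = init := by
  induction l generalizing init <;> simp_all

theorem pv_empty_case (steps : Int) (h : PySem.Int.floordiv steps 10 ≤ 0) :
    generate_color_spectrum steps = [] ∧ generate_color_spectrum_alt steps = [] := by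
  have h10c : ((pvColors.length : Int) - 1) = 10 := by norm_num [pvColors]
  have h10a : ((pvAnchors.length : Int) - 1) = 10 := by norm_num [pvAnchors]
  constructor
  · simp only [generate_color_spectrum, h10c, PySem.List.pyRange_one_eq_nil h, List.foldl_nil]
    exact pv_foldl_id _ _
  · simp only [generate_color_spectrum_alt, h10a, pvChannel,
      PySem.List.pyRange_one_eq_nil h]
    simp

-- ===== VERDICT (by name: the statement is the Claim_ definition above) =====
theorem generate_color_spectrum_spec : Claim_equal_generate_color_spectrum := by
  intro steps _ hpre
  unfold Spec_generate_color_spectrum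
  set n := PySem.Int.floordiv steps 10 with hn
  by_cases hle : n ≤ 0
  · have h := pv_empty_case steps (by omega)
    rw [h.1, h.2]
  · obtain ⟨m, hm⟩ : ∃ m : Nat, n = (m : Int) := ⟨n.toNat, by omega⟩
    rw [pv_A_eq_flat steps m (by omega), pv_B_eq_flat steps m (by omega)]
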